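-- pv_equiv track=rewrite | github.com/delpers/monitoring-backend | app/services/dns_service.py | detect_dns_spoofing
-- ===== SOURCE A (Python) =====
-- def detect_dns_spoofing(propagation_result):
--     ip_sets = []
--     for provider, result in propagation_result.items():
--         if isinstance(result, list):
--             ip_sets.append(set(result))
--
--     if not ip_sets:
--         return "No usable data"
--
--     first = ip_sets[0]
--     for ip_set in ip_sets[1:]:
--         if ip_set != first:
--             return "⚠️ Potential DNS Spoofing Detected!"
--     return "✅ No Spoofing Detected"
-- ===== SOURCE B (Python) =====
-- def detect_dns_spoofing(propagation_result):
--     n = 0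
--     counts = {}
--     for result in propagation_result.values():
--         if isinstance(result, list):
--             n += 1
--             for ip in set(result):
--                 counts[ip] = counts.get(ip, 0) + 1
--     if n == 0:
--         return "No usable data"
--     if all(c == n for c in counts.values()):
--         return "\u2705 No Spoofing Detected"
--     return "\u26a0\ufe0f Potential DNS Spoofing Detected!"
-- ===== Notes on version B (the rewrite author's own statement) =====
-- stated objective: alternative
-- what changed: Replaces A's pairwise set-equality scan against the first set by a frequency-counter algorithm: count in how many answer sets each IP occurs and report no spoofing iff every observed IP occurs in all n sets; no set comparison is performed.
import Mathlib
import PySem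

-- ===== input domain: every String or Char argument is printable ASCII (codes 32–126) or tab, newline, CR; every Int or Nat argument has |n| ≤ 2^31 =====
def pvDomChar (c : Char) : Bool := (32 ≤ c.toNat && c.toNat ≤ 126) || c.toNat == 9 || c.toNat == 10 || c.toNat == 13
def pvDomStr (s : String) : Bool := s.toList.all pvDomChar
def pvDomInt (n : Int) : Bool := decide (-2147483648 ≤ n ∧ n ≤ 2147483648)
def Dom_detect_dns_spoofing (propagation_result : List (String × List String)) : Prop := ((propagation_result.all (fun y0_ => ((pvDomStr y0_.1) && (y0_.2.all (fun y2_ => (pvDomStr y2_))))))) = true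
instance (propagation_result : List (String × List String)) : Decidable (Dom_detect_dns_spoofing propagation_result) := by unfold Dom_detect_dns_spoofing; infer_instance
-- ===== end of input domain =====

-- B replaces A's compare-each-set-to-the-first scan by a frequency-counter algorithm:
-- it counts in how many answer sets each IP occurs and reports no spoofing iff every
-- observed IP occurs in all n sets (alternative algorithm, no set comparisons).

-- ===== PORT A =====
-- `for ip_set in ip_sets[1:]: if ip_set != first: return …` (Python set `!=` = ¬ Set.equal)
def pvSpoofLoop (first : PySem.Set String) : List (PySem.Set String) → String
  | [] => "✅ No Spoofing Detected"
  | ip_set :: rest =>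
    if !(PySem.Set.equal ip_set first) then "⚠️ Potential DNS Spoofing Detected!"
    else pvSpoofLoop first rest

def detect_dns_spoofing (propagation_result : List (String × List String)) : String :=
  -- the isinstance(result, list) test is always true on this typed input
  let ip_sets : List (PySem.Set String) :=
    propagation_result.foldl (fun acc p => acc ++ [PySem.Set.ofList p.2]) []
  match ip_sets with
  | [] => "No usable data"
  | first :: rest => pvSpoofLoop first rest

-- ===== PORT B =====
-- `counts[ip] = counts.get(ip, 0) + 1` over `set(result)`; the counter is only read via the
-- order-insensitive `all(c == n for c in counts.values())`, so set iteration order is immaterial.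
def detect_dns_spoofing_alt (propagation_result : List (String × List String)) : String :=
  let st : Int × PySem.Dict String Int :=
    propagation_result.foldl
      (fun acc p =>
        (acc.1 + 1,
         (PySem.Set.ofList p.2).foldl (fun d ip => d.modify ip 0 (· + 1)) acc.2))
      (0, PySem.Dict.empty)
  if st.1 = 0 then "No usable data"
  else if st.2.values.all (fun c => c == st.1) then "✅ No Spoofing Detected"
  else "⚠️ Potential DNS Spoofing Detected!"

-- ===== PRECONDITION & SPEC =====
def Spec_detect_dns_spoofing (propagation_result : List (String × List String)) (out : String) : Prop := out = detect_dns_spoofing_alt propagation_result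
instance (propagation_result : List (String × List String)) (out : String) : Decidable (Spec_detect_dns_spoofing propagation_result out) := by unfold Spec_detect_dns_spoofing; infer_instance

-- ===== CLAIM (what is proved, stated in full; the proofs are below) =====
def Claim_equal_detect_dns_spoofing : Prop := ∀ (propagation_result : List (String × List String)), Dom_detect_dns_spoofing propagation_result → Spec_detect_dns_spoofing propagation_result (detect_dns_spoofing propagation_result)

-- ===== LEMMAS AND PROOFS =====

-- the per-set counting step of B's loop, named for the proofs
def pvCntStep (d : PySem.Dict String Int) (s : PySem.Set String) : PySem.Dict String Int :=
  s.foldl (fun d ip => d.modify ip 0 (· + 1)) d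

-- B's counter value at ip = the number of (Nodup) sets containing ip
theorem pvCnt_getD (sets : List (PySem.Set String)) (hnd : ∀ s ∈ sets, s.Nodup) :
    ∀ (d : PySem.Dict String Int) (ip : String),
      (sets.foldl pvCntStep d).getD ip 0
        = d.getD ip 0 + (sets.countP (fun s => s.contains ip) : Int) := by
  induction sets with
  | nil => intro d ip; simp
  | cons s t ih =>
    intro d ip
    have hs : s.Nodup := hnd s (by simp)
    have ht : ∀ x ∈ t, x.Nodup := fun x hx => hnd x (by simp [hx])
    simp only [List.foldl_cons, ih ht, List.countP_cons]
    have h1 : (pvCntStep d s).getD ip 0 = d.getD ip 0 + (s.count ip : Int) := by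
      simpa [pvCntStep] using PySem.Dict.getD_foldl_modify_add_one (l := s) (d := d) (v := ip)
    rw [h1]
    by_cases hmem : ip ∈ s
    · have hc : s.count ip = 1 := List.count_eq_one_of_mem hs hmem
      simp [hmem, hc]; omega
    · have hc : s.count ip = 0 := List.count_eq_zero_of_not_mem hmem
      simp [hmem, hc]

-- B's counter keys = the IPs occurring in some set
theorem pvCnt_keys_mem (sets : List (PySem.Set String)) :
    ∀ (d : PySem.Dict String Int) (ip : String),
      ip ∈ (sets.foldl pvCntStep d).keys ↔ ip ∈ d.keys ∨ ∃ s ∈ sets, ip ∈ s := by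
  induction sets with
  | nil => intro d ip; simp
  | cons s t ih =>
    intro d ip
    simp only [List.foldl_cons, ih]
    have : (pvCntStep d s).keys = PySem.Set.update d.keys s := by
      simpa [pvCntStep] using PySem.Dict.keys_foldl_modify (l := s) (d := d) (d0 := (0:Int)) (f := fun d x => (· + 1))
    rw [this]
    simp [PySem.Set.mem_update]
    tauto

theorem pvCnt_keys_nodup (sets : List (PySem.Set String)) :
    ∀ (d : PySem.Dict String Int), d.keys.Nodup → (sets.foldl pvCntStep d).keys.Nodup := by
  induction sets with
  | nil => intro d h; simpa
  | cons s t ih =>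
    intro d h
    rw [List.foldl_cons]
    refine ih _ ?_
    simpa [pvCntStep] using PySem.Dict.nodup_keys_foldl_modify_key (l := s) (key := fun x => x) (d0 := (0:Int)) (f := fun d x => (· + 1)) (d := d) h

-- A's early-exit loop as an `all` test
theorem pvSpoofLoop_eq (first : PySem.Set String) (rest : List (PySem.Set String)) :
    pvSpoofLoop first rest =
      if rest.all (fun s => PySem.Set.equal s first) then "✅ No Spoofing Detected"
      else "⚠️ Potential DNS Spoofing Detected!" := by
  induction rest with
  | nil => simp [pvSpoofLoop]
  | cons s t ih =>
    by_cases h : PySem.Set.equal s first = true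
    · simp only [pvSpoofLoop, h, Bool.not_true, Bool.false_eq_true, if_false, ih, List.all_cons, Bool.true_and]
    · simp [pvSpoofLoop, Bool.eq_false_iff.mpr h]

-- every observed IP occurs in all sets ↔ every set equals the first
theorem pvCounter_iff (first : PySem.Set String) (rest : List (PySem.Set String))
    (hnd : ∀ s ∈ first :: rest, s.Nodup) :
    ((∀ ip, (∃ s ∈ first :: rest, ip ∈ s) →
        ((first :: rest).countP (fun s => s.contains ip) : Int) = ((first :: rest).length : Int))
      ↔ ∀ s ∈ rest, PySem.Set.equal s first = true) := by
  constructor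
  · intro h s hs
    have hall : ∀ ip, (∃ u ∈ first :: rest, ip ∈ u) → ∀ u ∈ first :: rest, ip ∈ u := by
      intro ip hex u hu
      have := h ip hex
      have hcnt : (first :: rest).countP (fun v => v.contains ip) = (first :: rest).length := by
        exact_mod_cast this
      have := List.countP_eq_length.mp hcnt u hu
      simpa using this
    rw [PySem.Set.equal_iff]
    intro x
    constructor
    · intro hx; exact hall x ⟨s, by simp [hs], hx⟩ first (by simp)
    · intro hx; exact hall x ⟨first, by simp, hx⟩ s (by simp [hs])
  · intro h ip hex
    have hin : ∀ u ∈ first :: rest, ip ∈ u := by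
      obtain ⟨s, hs, hips⟩ := hex
      have hfirst : ip ∈ first := by
        rcases List.mem_cons.mp hs with rfl | hs'
        · exact hips
        · exact (PySem.Set.equal_iff _ _ |>.mp (h s hs') ip).mp hips
      intro u hu
      rcases List.mem_cons.mp hu with rfl | hu'
      · exact hfirst
      · exact (PySem.Set.equal_iff _ _ |>.mp (h u hu') ip).mpr hfirst
    have : (first :: rest).countP (fun v => v.contains ip) = (first :: rest).length :=
      List.countP_eq_length.mpr (fun u hu => by simpa using hin u hu)
    exact_mod_cast this

-- B's paired fold = (length, counter over the value sets)
theorem pvB_state (pr : List (String × List String)) :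
    ∀ (a : Int) (d : PySem.Dict String Int),
      pr.foldl (fun acc p =>
          (acc.1 + 1, (PySem.Set.ofList p.2).foldl (fun d ip => d.modify ip 0 (· + 1)) acc.2))
        (a, d)
      = (a + pr.length, (pr.map (fun p => PySem.Set.ofList p.2)).foldl pvCntStep d) := by
  induction pr with
  | nil => intro a d; simp
  | cons p t ih =>
    intro a d
    simp only [List.foldl_cons, List.map_cons, ih, pvCntStep]
    refine Prod.ext ?_ rfl
    simp; ring

theorem detect_dns_spoofing_eq (pr : List (String × List String)) :
    detect_dns_spoofing pr = detect_dns_spoofing_alt pr := by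
  unfold detect_dns_spoofing detect_dns_spoofing_alt
  simp only [PySem.List.foldl_append_singleton_eq_map, List.nil_append, pvB_state, zero_add]
  cases pr with
  | nil => simp
  | cons p t =>
    simp only [List.map_cons]
    have hne0 : ((p :: t).length : Int) ≠ 0 := by exact Int.natCast_ne_zero.mpr (by simp)
    rw [pvSpoofLoop_eq]
    set first := PySem.Set.ofList p.2 with hfirst
    set rest := t.map (fun q => PySem.Set.ofList q.2) with hrest
    set sets := first :: rest with hsets
    set n : Int := ((p :: t).length : Int) with hn
    set d := sets.foldl pvCntStep PySem.Dict.empty with hd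
    have hndsets : ∀ s ∈ sets, s.Nodup := by
      intro s hs
      rcases List.mem_cons.mp hs with rfl | hs'
      · exact PySem.Set.nodup_ofList _
      · obtain ⟨q, _, rfl⟩ := List.mem_map.mp hs'
        exact PySem.Set.nodup_ofList _
    have hknd : d.keys.Nodup := pvCnt_keys_nodup sets PySem.Dict.empty (by simp [PySem.Dict.keys_empty])
    have hkeymem : ∀ ip, ip ∈ d.keys ↔ ∃ s ∈ sets, ip ∈ s := by
      intro ip
      rw [hd, pvCnt_keys_mem]
      simp [PySem.Dict.keys_empty]
    have hgetD : ∀ ip, d.getD ip 0 = (sets.countP (fun s => s.contains ip) : Int) := by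
      intro ip
      rw [hd, pvCnt_getD sets hndsets]
      simp [PySem.Dict.getD_empty]
    have hlen : n = (sets.length : Int) := by simp [hn, hsets, hrest]
    have hBcond : (d.values.all (fun c => c == n) = true)
        ↔ (∀ s ∈ rest, PySem.Set.equal s first = true) := by
      rw [PySem.Dict.values_eq_map_keys d hknd 0, List.all_map]
      rw [List.all_eq_true]
      constructor
      · intro h
        rw [← pvCounter_iff first rest hndsets]
        intro ip hex
        have hk : ip ∈ d.keys := (hkeymem ip).mpr hex
        have := h ip hk
        simp only [Function.comp, beq_iff_eq] at this
        rw [← hgetD ip, this, hlen]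
      · intro h ip hk
        have hex := (hkeymem ip).mp hk
        have := (pvCounter_iff first rest hndsets).mpr h ip hex
        simp only [Function.comp, beq_iff_eq]
        rw [hgetD ip, this, hlen]
    simp only [if_neg hne0]
    split_ifs with h1 h2 h3
    · rfl
    · exact absurd (hBcond.mpr (List.all_eq_true.mp h1)) h2
    · exact absurd (List.all_eq_true.mpr (hBcond.mp h3)) h1
    · rfl

-- ===== VERDICT (by name: the statement is the Claim_ definition above) =====
theorem detect_dns_spoofing_spec : Claim_equal_detect_dns_spoofing := by
  intro pr _
  unfold Spec_detect_dns_spoofing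
  exact detect_dns_spoofing_eq pr
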